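-- pv_equiv track=rewrite | github.com/Mae-Avadiaev/Algos-and-DS-python | Advanced Algorithms and Complexity/Simplex Method.py | first_nonneg_in_col
-- ===== SOURCE A (Python) =====
-- def first_nonneg_in_col(mat):
--     nonneg = False
--     for i in range(len(mat) - 1):
--         for j in range(len(mat[i])):
--             if mat[i][j] < 0:
--                 neg_elem = mat[i][j]
--                 neg_col = i
--                 neg_ind = j
--                 nonneg = True
--                 break
--     if nonneg:
--         for k in range(len(mat[neg_col])):
--             if mat[neg_col][k] > 0:
--                 return k
--     else:
--         return None
-- ===== SOURCE B (Python) =====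
-- def first_nonneg_in_col(mat):
--     for i in range(len(mat) - 2, -1, -1):
--         row = mat[i]
--         if any(x < 0 for x in row):
--             for k, x in enumerate(row):
--                 if x > 0:
--                     return k
--             return None
--     return None
-- ===== Notes on version B (the rewrite author's own statement) =====
-- stated objective: alternative
-- what changed: B searches bottom-up from row len-2 and stops at the first row containing a negative (that is the row A's top-down overwrite ends with), instead of A's exhaustive scan of all rows that keeps overwriting the recorded index.
import Mathlib
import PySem

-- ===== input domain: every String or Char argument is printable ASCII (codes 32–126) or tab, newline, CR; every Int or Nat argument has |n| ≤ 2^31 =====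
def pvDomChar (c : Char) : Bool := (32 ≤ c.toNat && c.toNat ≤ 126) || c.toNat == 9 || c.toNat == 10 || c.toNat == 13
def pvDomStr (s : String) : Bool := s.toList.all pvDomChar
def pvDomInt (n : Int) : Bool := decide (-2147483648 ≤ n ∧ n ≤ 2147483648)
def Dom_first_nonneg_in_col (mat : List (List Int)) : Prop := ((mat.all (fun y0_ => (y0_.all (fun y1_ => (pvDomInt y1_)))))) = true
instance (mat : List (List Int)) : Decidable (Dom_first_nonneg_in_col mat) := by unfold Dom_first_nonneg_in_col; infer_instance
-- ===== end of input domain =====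

-- B searches bottom-up from row len(mat)-2 and stops at the first row containing a negative,
-- instead of A's top-down scan of all rows that keeps overwriting the recorded row index.


-- ===== PORT A =====
-- inner 'for j in range(len(mat[i])): if mat[i][j] < 0: … break' — returns whether the break fired
def pvA_negLoop : List Nat → List Int → Bool
  | [], _ => false
  | j :: js, row => if row.getD j 0 < 0 then true else pvA_negLoop js row

-- final 'for k in range(len(mat[neg_col])): if mat[neg_col][k] > 0: return k'
def pvA_posLoop : List Nat → List Int → Option Int
  | [], _ => none
  | k :: ks, row => if row.getD k 0 > 0 then some (k : Int) else pvA_posLoop ks row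

def first_nonneg_in_col (mat : List (List Int)) : Option Int :=
  let st := (List.range (mat.length - 1)).foldl
      (fun acc i =>
        let row := mat.getD i []
        if pvA_negLoop (List.range row.length) row then some i else acc)
      (none : Option Nat)
  match st with
  | some i =>
      let row := mat.getD i []
      pvA_posLoop (List.range row.length) row
  | none => none

-- ===== PORT B =====
-- 'for i in range(len(mat)-2, -1, -1): … break' — scanning the first len-1 rows bottom-up
def pvB_scan : List (List Int) → Option (List Int)
  | [] => none
  | r :: rs => if r.any (fun x => x < 0) then some r else pvB_scan rs

-- 'for k, x in enumerate(row): if x > 0: return k'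
def pvB_firstPos : List Int → Nat → Option Int
  | [], _ => none
  | x :: xs, k => if x > 0 then some (k : Int) else pvB_firstPos xs (k + 1)

def first_nonneg_in_col_alt (mat : List (List Int)) : Option Int :=
  match pvB_scan ((mat.take (mat.length - 1)).reverse) with
  | some row => pvB_firstPos row 0
  | none => none

-- ===== PRECONDITION & SPEC =====
def Spec_first_nonneg_in_col (mat : List (List Int)) (out : Option Int) : Prop := out = first_nonneg_in_col_alt mat
instance (mat : List (List Int)) (out : Option Int) : Decidable (Spec_first_nonneg_in_col mat out) := by unfold Spec_first_nonneg_in_col; infer_instance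

-- ===== CLAIM (what is proved, stated in full; the proofs are below) =====
def Claim_equal_first_nonneg_in_col : Prop := ∀ (mat : List (List Int)), Dom_first_nonneg_in_col mat → Spec_first_nonneg_in_col mat (first_nonneg_in_col mat)

-- ===== LEMMAS AND PROOFS =====

theorem pvA_negLoop_eq (t : List Int) : ∀ (k : Nat) (row : List Int), row.drop k = t →
    pvA_negLoop (List.range' k t.length) row = t.any (fun x => x < 0) := by
  induction t with
  | nil => intro k row _; simp [pvA_negLoop]
  | cons x xs ih =>
    intro k row h
    have hk : row[k]? = some x := by
      rw [← List.head?_drop, h]; rfl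
    have hd : row.drop (k + 1) = xs := by
      have : (row.drop k).drop 1 = xs := by simp [h]
      simpa [List.drop_drop] using this
    simp only [List.length_cons, List.range'_succ, pvA_negLoop, List.getD, hk,
      Option.getD_some, List.any_cons]
    by_cases hx : x < 0
    · simp [hx]
    · simp [hx, ih (k + 1) row hd]

theorem pvA_posLoop_eq (t : List Int) : ∀ (k : Nat) (row : List Int), row.drop k = t →
    pvA_posLoop (List.range' k t.length) row = pvB_firstPos t k := by
  induction t with
  | nil => intro k row _; simp [pvA_posLoop, pvB_firstPos]
  | cons x xs ih =>
    intro k row h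
    have hk : row[k]? = some x := by
      rw [← List.head?_drop, h]; rfl
    have hd : row.drop (k + 1) = xs := by
      have : (row.drop k).drop 1 = xs := by simp [h]
      simpa [List.drop_drop] using this
    simp only [List.length_cons, List.range'_succ, pvA_posLoop, pvB_firstPos, List.getD, hk,
      Option.getD_some]
    by_cases hx : x > 0
    · simp [hx]
    · simp [hx, ih (k + 1) row hd]

theorem pvA_negLoop_any (row : List Int) :
    pvA_negLoop (List.range row.length) row = row.any (fun x => x < 0) := by
  simpa [List.range_eq_range'] using pvA_negLoop_eq row 0 row (by simp)

theorem pvA_posLoop_firstPos (row : List Int) :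
    pvA_posLoop (List.range row.length) row = pvB_firstPos row 0 := by
  simpa [List.range_eq_range'] using pvA_posLoop_eq row 0 row (by simp)

theorem fold_scan (mat : List (List Int)) : ∀ (n : Nat),
    Option.map (fun i => mat.getD i [])
      ((List.range n).foldl
        (fun acc i =>
          let row := mat.getD i []
          if pvA_negLoop (List.range row.length) row then some i else acc)
        (none : Option Nat))
    = pvB_scan ((mat.take n).reverse) := by
  intro n
  induction n with
  | zero => simp [pvB_scan]
  | succ n ih =>
    rw [List.range_succ, List.foldl_append, List.take_add_one]
    simp only [List.foldl_cons, List.foldl_nil, List.reverse_append]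
    by_cases hn : n < mat.length
    · have hsome : mat[n]? = some mat[n] := List.getElem?_eq_getElem hn
      have hgd : mat.getD n [] = mat[n] := by simp [List.getD, hsome]
      rw [hsome]
      simp only [Option.toList_some, List.reverse_cons, List.reverse_nil, List.nil_append,
        List.cons_append, List.nil_append, pvB_scan]
      rw [pvA_negLoop_any, hgd]
      by_cases hneg : mat[n].any (fun x => x < 0)
      · simp [hneg, List.getD, hsome]
      · simpa [hneg, List.getD] using ih
    · have hnone : mat[n]? = none := by
        simp; omega
      have hgd : mat.getD n [] = [] := by simp [List.getD, hnone]
      rw [hnone]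
      simp only [Option.toList_none, List.reverse_nil, List.nil_append]
      rw [pvA_negLoop_any, hgd]
      simpa using ih

-- ===== VERDICT (by name: the statement is the Claim_ definition above) =====
theorem first_nonneg_in_col_spec : Claim_equal_first_nonneg_in_col := by
  intro mat _
  unfold Spec_first_nonneg_in_col first_nonneg_in_col first_nonneg_in_col_alt
  have h := fold_scan mat (mat.length - 1)
  cases hst : (List.range (mat.length - 1)).foldl
      (fun acc i =>
        let row := mat.getD i []
        if pvA_negLoop (List.range row.length) row then some i else acc)
      (none : Option Nat) with
  | none =>
    rw [hst] at h
    simp only [Option.map_none] at h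
    simp [← h]
  | some i =>
    rw [hst] at h
    simp only [Option.map_some] at h
    simp [← h, pvA_posLoop_firstPos]
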